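-- pv_equiv track=rewrite | github.com/a175/try-manim | test/20210606/example.py | codestr2code
-- ===== SOURCE A (Python) =====
-- def codestr2code(codestr):
--     code=[(None,None)]
--     cix=None
--     stack=[]
--     for (i,ci) in enumerate(codestr):
--         if ci == '[':
--             stack.append(len(code))
--             code.append((ci,None))
--         elif ci == ']':
--             j=stack.pop()
--             code[j]=('[',len(code)-1)
--             code.append((ci,j-1))
--         else:
--             if code[-1][0] == ci:
--                 cjn=code[-1][1]
--                 if cjn <10:
--                     code[-1]=(ci,cjn+1)
--                 else:
--                     code.append((ci,1))
--             else:
--                 code.append((ci,1))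
--     code=code[1:]
--     return code
-- ===== SOURCE B (Python) =====
-- def codestr2code(codestr):
--     # pass 1: run-length encode (cap 10), brackets as (char, None) placeholders
--     code = []
--     for ch in codestr:
--         if ch == '[' or ch == ']':
--             code.append((ch, None))
--         else:
--             last = code[-1] if code else None
--             if last is not None and last[0] == ch and last[1] < 10:
--                 code[-1] = (ch, last[1] + 1)
--             else:
--                 code.append((ch, 1))
--     # pass 2: link matching brackets by their final indices
--     stack = []
--     for i in range(len(code)):
--         ch = code[i][0]
--         if ch == '[':
--             stack.append(i)
--         elif ch == ']':
--             j = stack.pop()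
--             code[j] = ('[', i)
--             code[i] = (']', j)
--     return code
-- ===== Notes on version B (the rewrite author's own statement) =====
-- stated objective: alternative
-- what changed: A's single pass with a sentinel entry, a stack of sentinel-shifted code indices and in-place partner patching during the scan is replaced by two passes: run-length encoding (cap 10) with bracket placeholders, then a stack scan over final indices that links matching brackets.
-- outside the precondition, e.g. on codestr2code(']'): A raises IndexError, B raises IndexError; on codestr2code('['): A returns [('[', None)], B returns [('[', None)]
import Mathlib
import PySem

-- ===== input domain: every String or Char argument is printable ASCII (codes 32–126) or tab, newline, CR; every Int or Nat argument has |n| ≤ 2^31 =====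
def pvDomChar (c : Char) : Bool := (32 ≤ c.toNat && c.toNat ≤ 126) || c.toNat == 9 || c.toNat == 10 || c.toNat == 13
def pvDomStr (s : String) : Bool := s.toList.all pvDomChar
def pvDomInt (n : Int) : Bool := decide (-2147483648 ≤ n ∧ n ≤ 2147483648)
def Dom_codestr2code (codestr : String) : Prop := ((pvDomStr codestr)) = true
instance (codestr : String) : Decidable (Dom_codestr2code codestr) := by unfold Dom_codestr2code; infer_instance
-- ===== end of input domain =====

-- B replaces A's single pass (sentinel entry, stack of sentinel-shifted indices, in-place
-- partner patching during the scan) by two passes: run-length encoding with bracket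
-- placeholders, then a stack scan over final indices linking matching brackets (alternative
-- decomposition, same cost).

-- ===== PORT A =====
-- entries are (string, count); Python's None count is Option.none here.  Python's sentinel
-- (None, None) is ported as ("", none): its first component, like Python's None, is never
-- equal to a one-character string.  Python's stack.append/stack.pop() work at the right
-- end; the port keeps the stack top at the head of the list.
def codestr2codeStep (st : List (String × Option Int) × List Nat) (ci : Char) :
    List (String × Option Int) × List Nat :=
  let code := st.1
  let stack := st.2
  if ci = '[' then
    (code ++ [("[", none)], code.length :: stack)
  else if ci = ']' then
    match stack with
    | j :: rest =>
        ((code.set j ("[", some ((code.length : Int) - 1))) ++ [("]", some ((j : Int) - 1))], rest)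
    | [] => (code ++ [("]", none)], [])  -- Python raises IndexError (pop from empty); outside Pre_
  else
    let last := code.getLastD ("", none)
    if last.1 = String.singleton ci then
      match last.2 with
      | some cjn =>
          if cjn < 10 then (code.dropLast ++ [(String.singleton ci, some (cjn + 1))], stack)
          else (code ++ [(String.singleton ci, some 1)], stack)
      | none => (code ++ [(String.singleton ci, some 1)], stack)  -- unreachable (Python would raise TypeError)
    else (code ++ [(String.singleton ci, some 1)], stack)

def codestr2code (codestr : String) : List (String × Int) :=
  let r := codestr.toList.foldl codestr2codeStep ([("", none)], [])
  -- code = code[1:] drops the sentinel; a leftover Python None (unmatched '[') is mapped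
  -- to 0 — such inputs are excluded by Pre_ (the Python value None is not an int)
  r.1.tail.map (fun p => (p.1, p.2.getD 0))

-- ===== PORT B =====
-- pass 1 of Source B: run-length encoding capped at 10, brackets become (char, None) placeholders
def pass1Step (code : List (String × Option Int)) (ch : Char) : List (String × Option Int) :=
  if ch = '[' ∨ ch = ']' then code ++ [(String.singleton ch, none)]
  else
    match code.getLast? with
    | some last =>
        if last.1 = String.singleton ch then
          match last.2 with
          | some n =>
              if n < 10 then code.dropLast ++ [(String.singleton ch, some (n + 1))]
              else code ++ [(String.singleton ch, some 1)]
          | none => code ++ [(String.singleton ch, some 1)]  -- unreachable: a placeholder's char is a bracket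
        else code ++ [(String.singleton ch, some 1)]
    | none => code ++ [(String.singleton ch, some 1)]

-- pass 2 of Source B: the index loop `for i in range(len(code))` reading code[i] and setting
-- positions j ≤ i, ported structurally: `done` is code[:i] (already carrying every set so
-- far), `rest` is code[i:] (never modified before being reached), i = done.length; stack
-- top at the head.
def pass2 (done rest : List (String × Option Int)) (stack : List Nat) :
    List (String × Option Int) × List Nat :=
  match rest with
  | [] => (done, stack)
  | e :: rest' =>
    if e.1 = "[" then pass2 (done ++ [e]) rest' (done.length :: stack)
    else if e.1 = "]" then
      match stack with
      | j :: st' =>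
          pass2 ((done.set j ("[", some (done.length : Int))) ++ [("]", some (j : Int))]) rest' st'
      | [] => pass2 (done ++ [e]) rest' []  -- Python raises IndexError (pop from empty); outside Pre_
    else pass2 (done ++ [e]) rest' stack

def codestr2code_alt (codestr : String) : List (String × Int) :=
  let L := codestr.toList.foldl pass1Step []
  (pass2 [] L []).1.map (fun p => (p.1, p.2.getD 0))

-- ===== PRECONDITION & SPEC =====
-- Pre_ excludes strings with unmatched brackets: on an unmatched ']' Python A raises
-- IndexError, and an unmatched '[' leaves a Python None in the returned pairs, which is
-- not a value of the declared (str, int) type.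
def Pre_codestr2code (codestr : String) : Prop :=
  (∀ n ∈ List.range (codestr.toList.length + 1),
      (codestr.toList.take n).count ']' ≤ (codestr.toList.take n).count '[') ∧
  codestr.toList.count '[' = codestr.toList.count ']'
instance (codestr : String) : Decidable (Pre_codestr2code codestr) := by
  unfold Pre_codestr2code; infer_instance

def pvWitness_codestr2code : String := "ab[cc]d"

def Spec_codestr2code (codestr : String) (out : List (String × Int)) : Prop := out = codestr2code_alt codestr
instance (codestr : String) (out : List (String × Int)) : Decidable (Spec_codestr2code codestr out) := by unfold Spec_codestr2code; infer_instance

-- ===== CLAIM (what is proved, stated in full; the proofs are below) =====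
def Claim_equal_codestr2code : Prop := ∀ (codestr : String), Dom_codestr2code codestr → Pre_codestr2code codestr → Spec_codestr2code codestr (codestr2code codestr)

-- ===== LEMMAS AND PROOFS =====

theorem singleton_eq_iff (a b : Char) : String.singleton a = String.singleton b ↔ a = b := by
  constructor
  · intro h
    simpa using congrArg String.toList h
  · intro h; rw [h]

theorem singleton_ne_empty (a : Char) : ("" : String) ≠ String.singleton a := by
  intro h
  simpa using congrArg String.toList h

theorem pass2_append (r1 : List (String × Option Int)) (d r2 : List (String × Option Int))
    (st : List Nat) :
    pass2 d (r1 ++ r2) st = pass2 (pass2 d r1 st).1 r2 (pass2 d r1 st).2 := by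
  induction r1 generalizing d st with
  | nil => simp [pass2]
  | cons e r1' ih =>
    simp only [List.cons_append, pass2]
    split_ifs with h1 h2
    · exact ih _ _
    · cases st with
      | nil => exact ih _ _
      | cons j st' => exact ih _ _
    · exact ih _ _

theorem pass2_concat_nonbracket (L : List (String × Option Int)) (x : String × Option Int)
    (hx1 : x.1 ≠ "[") (hx2 : x.1 ≠ "]") :
    pass2 [] (L ++ [x]) [] = ((pass2 [] L []).1 ++ [x], (pass2 [] L []).2) := by
  rw [pass2_append]
  simp [pass2, hx1, hx2]

-- structure of the pass2 result of a nonempty list: it ends with an entry whose char is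
-- the char of the last input entry, and a non-bracket last entry is kept verbatim.
theorem pass2_concat_struct (L : List (String × Option Int)) (e : String × Option Int) :
    ∃ P x, (pass2 [] (L ++ [e]) []).1 = P ++ [x] ∧ x.1 = e.1 ∧
      (e.1 ≠ "[" → e.1 ≠ "]" → P = (pass2 [] L []).1 ∧ x = e ∧
        (pass2 [] (L ++ [e]) []).2 = (pass2 [] L []).2) := by
  rw [pass2_append]
  by_cases h1 : e.1 = "["
  · exact ⟨(pass2 [] L []).1, e, by simp [pass2, h1], rfl, fun h => absurd h1 h⟩
  · by_cases h2 : e.1 = "]"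
    · cases hst : (pass2 [] L []).2 with
      | nil =>
        exact ⟨(pass2 [] L []).1, e, by simp [pass2, h2], rfl,
          fun _ h => absurd h2 h⟩
      | cons j st' =>
        refine ⟨((pass2 [] L []).1).set j ("[", some (((pass2 [] L []).1).length : Int)),
          ("]", some (j : Int)), by simp [pass2, h2], by simp [h2],
          fun _ h => absurd h2 h⟩
    · exact ⟨(pass2 [] L []).1, e, by simp [pass2, h1, h2], rfl,
        fun _ _ => ⟨rfl, rfl, by simp [pass2, h1, h2]⟩⟩

-- the main invariant: after any prefix, A's fold state is the sentinel consed onto the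
-- full pass2 result of B's pass1 list, with A's stack the pass2 stack shifted by the
-- sentinel; and every non-bracket entry of the pass1 list carries a real count.
theorem invariant (l : List Char) :
    (l.foldl codestr2codeStep ([("", none)], [])).1
        = ("", none) :: (pass2 [] (l.foldl pass1Step []) []).1
    ∧ (l.foldl codestr2codeStep ([("", none)], [])).2
        = ((pass2 [] (l.foldl pass1Step []) []).2).map (· + 1)
    ∧ (∀ e ∈ l.foldl pass1Step [], e.1 ≠ "[" → e.1 ≠ "]" → ∃ n, e.2 = some n) := by
  induction l using List.reverseRecOn with
  | nil => simp [pass2]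
  | append_singleton l c ih =>
    obtain ⟨ih1, ih2, ih3⟩ := ih
    rw [List.foldl_append, List.foldl_append]
    simp only [List.foldl_cons, List.foldl_nil]
    set A := l.foldl codestr2codeStep ([("", none)], []) with hA
    set L := l.foldl pass1Step [] with hL
    by_cases hc1 : c = '['
    · subst hc1
      have hstepA : codestr2codeStep A '[' = (A.1 ++ [("[", none)], A.1.length :: A.2) := by
        simp [codestr2codeStep]
      have hstepB : pass1Step L '[' = L ++ [("[", none)] := by
        simp [pass1Step]; rfl
      rw [hstepA, hstepB, pass2_append]
      refine ⟨?_, ?_, ?_⟩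
      · rw [ih1]; simp [pass2]
      · rw [ih1, ih2]; simp [pass2]
      · intro e he h1 h2
        rcases List.mem_append.1 he with h | h
        · exact ih3 e h h1 h2
        · rw [List.mem_singleton] at h
          exact absurd (by rw [h]) h1
    · by_cases hc2 : c = ']'
      · subst hc2
        have hstepB : pass1Step L ']' = L ++ [("]", none)] := by
          simp [pass1Step]; rfl
        rw [hstepB, pass2_append]
        cases hst : (pass2 [] L []).2 with
        | nil =>
          have hA2 : A.2 = [] := by rw [ih2, hst]; rfl
          have hstepA : codestr2codeStep A ']' = (A.1 ++ [("]", none)], []) := by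
            simp [codestr2codeStep, hA2]
          have hstep2 : pass2 (pass2 [] L []).1 [(("]" : String), (none : Option Int))] []
              = ((pass2 [] L []).1 ++ [("]", none)], []) := by
            simp [pass2]
          rw [hstepA, hstep2]
          refine ⟨?_, ?_, ?_⟩
          · rw [ih1]; simp
          · simp
          · intro e he h1 h2
            rcases List.mem_append.1 he with h | h
            · exact ih3 e h h1 h2
            · rw [List.mem_singleton] at h
              exact absurd (by rw [h]) h2
        | cons j st' =>
          have hA2 : A.2 = (j + 1) :: st'.map (· + 1) := by rw [ih2, hst]; rfl
          have hstepA : codestr2codeStep A ']'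
              = ((A.1.set (j + 1) ("[", some ((A.1.length : Int) - 1)))
                  ++ [("]", some (((j + 1 : Nat) : Int) - 1))], st'.map (· + 1)) := by
            simp [codestr2codeStep, hA2]
          have hstep2 : pass2 (pass2 [] L []).1 [(("]" : String), (none : Option Int))] (j :: st')
              = ((pass2 [] L []).1.set j ("[", some (((pass2 [] L []).1).length : Int))
                  ++ [("]", some (j : Int))], st') := by
            simp [pass2]
          rw [hstepA, hstep2]
          refine ⟨?_, ?_, ?_⟩
          · rw [ih1]
            have hlen : (((("", (none : Option Int)) :: (pass2 [] L []).1)).length : Int) - 1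
                = (((pass2 [] L []).1).length : Int) := by
              simp
            have hj : (((j + 1 : Nat)) : Int) - 1 = (j : Int) := by push_cast; ring
            rw [hlen, hj, List.set_cons_succ]
            simp
          · rfl
          · intro e he h1 h2
            rcases List.mem_append.1 he with h | h
            · exact ih3 e h h1 h2
            · rw [List.mem_singleton] at h
              exact absurd (by rw [h]) h2
      · -- non-bracket character
        have hsb1 : String.singleton c ≠ "[" := by
          intro h; exact hc1 ((singleton_eq_iff c '[').1 h)
        have hsb2 : String.singleton c ≠ "]" := by
          intro h; exact hc2 ((singleton_eq_iff c ']').1 h)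
        rcases List.eq_nil_or_concat L with hnil | ⟨L₀, e, hcat⟩
        · -- pass-1 list still empty: A sees only the sentinel, both append (c, 1)
          have hp : pass2 [] ([] : List (String × Option Int)) [] = ([], []) := by
            simp [pass2]
          have hA1 : A.1 = [("", none)] := by rw [ih1, hnil, hp]
          have hA2 : A.2 = [] := by rw [ih2, hnil, hp]; rfl
          have hlast : A.1.getLast? = some ("", none) := by rw [hA1]; rfl
          have hstepA : codestr2codeStep A c = (A.1 ++ [(String.singleton c, some 1)], A.2) := by
            simp [codestr2codeStep, hc1, hc2, hlast, singleton_ne_empty c]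
          have hstepB : pass1Step L c = [(String.singleton c, some 1)] := by
            rw [hnil]; simp [pass1Step, hc1, hc2]
          rw [hstepA, hstepB]
          refine ⟨?_, ?_, ?_⟩
          · rw [hA1]; simp [pass2, hsb1, hsb2]
          · rw [hA2]; simp [pass2, hsb1, hsb2]
          · intro e' he' h1 h2
            rw [List.mem_singleton] at he'
            rw [he']
            exact ⟨1, rfl⟩
        · -- nonempty pass-1 list: A's last entry is pass2's image of B's last entry
          rw [List.concat_eq_append] at hcat
          obtain ⟨P, x, hPx, hxch, hnb⟩ := pass2_concat_struct L₀ e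
          have hPL : (pass2 [] L []).1 = P ++ [x] := by rw [hcat]; exact hPx
          have hlast : A.1.getLast? = some x := by
            rw [ih1, hPL,
              show (("", (none : Option Int)) :: (P ++ [x]))
                  = ((("", (none : Option Int)) :: P) ++ [x]) by simp]
            exact List.getLast?_concat
          have hgetB : L.getLast? = some e := by rw [hcat]; exact List.getLast?_concat
          by_cases hx : x.1 = String.singleton c
          · -- same char as the current run: A merges iff n < 10, and so does B
            have hech : e.1 = String.singleton c := by rw [← hxch, hx]
            have hen1 : e.1 ≠ "[" := by rw [hech]; exact hsb1
            have hen2 : e.1 ≠ "]" := by rw [hech]; exact hsb2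
            obtain ⟨hPq, hxe, hst2⟩ := hnb hen1 hen2
            obtain ⟨n, hn⟩ := ih3 e (by rw [hcat]; simp) hen1 hen2
            have hx2 : x.2 = some n := by rw [hxe]; exact hn
            by_cases hlt : n < 10
            · have hstepA : codestr2codeStep A c
                  = (A.1.dropLast ++ [(String.singleton c, some (n + 1))], A.2) := by
                simp [codestr2codeStep, hc1, hc2, hlast, hx, hx2, hlt]
              have hstepB : pass1Step L c = L₀ ++ [(String.singleton c, some (n + 1))] := by
                simp [pass1Step, hc1, hc2, hech, hn, hlt, hcat]
              rw [hstepA, hstepB, pass2_concat_nonbracket L₀ _ hsb1 hsb2]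
              refine ⟨?_, ?_, ?_⟩
              · rw [ih1, hPL, hPq,
                  show (("", (none : Option Int)) :: ((pass2 [] L₀ []).1 ++ [x]))
                      = ((("", (none : Option Int)) :: (pass2 [] L₀ []).1) ++ [x]) by simp,
                  List.dropLast_concat]
                simp
              · rw [ih2, hcat, hst2]
              · intro e' he' h1 h2
                rcases List.mem_append.1 he' with h | h
                · exact ih3 e' (by rw [hcat]; exact List.mem_append_left _ h) h1 h2
                · rw [List.mem_singleton] at h
                  rw [h]
                  exact ⟨n + 1, rfl⟩
            · have hstepA : codestr2codeStep A c
                  = (A.1 ++ [(String.singleton c, some 1)], A.2) := by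
                simp [codestr2codeStep, hc1, hc2, hlast, hx, hx2, hlt]
              have hstepB : pass1Step L c = L ++ [(String.singleton c, some 1)] := by
                simp [pass1Step, hc1, hc2, hgetB, hech, hn, hlt]
              rw [hstepA, hstepB, pass2_concat_nonbracket L _ hsb1 hsb2]
              refine ⟨?_, ?_, ?_⟩
              · rw [ih1]; simp
              · rw [ih2]
              · intro e' he' h1 h2
                rcases List.mem_append.1 he' with h | h
                · exact ih3 e' h h1 h2
                · rw [List.mem_singleton] at h
                  rw [h]
                  exact ⟨1, rfl⟩
          · -- different char (or a bracket): both append a fresh (c, 1) entry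
            have hech : e.1 ≠ String.singleton c := fun h => hx (hxch.trans h)
            have hstepA : codestr2codeStep A c
                = (A.1 ++ [(String.singleton c, some 1)], A.2) := by
              simp [codestr2codeStep, hc1, hc2, hlast, hx]
            have hstepB : pass1Step L c = L ++ [(String.singleton c, some 1)] := by
              simp [pass1Step, hc1, hc2, hgetB, hech]
            rw [hstepA, hstepB, pass2_concat_nonbracket L _ hsb1 hsb2]
            refine ⟨?_, ?_, ?_⟩
            · rw [ih1]; simp
            · rw [ih2]
            · intro e' he' h1 h2
              rcases List.mem_append.1 he' with h | h
              · exact ih3 e' h h1 h2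
              · rw [List.mem_singleton] at h
                rw [h]
                exact ⟨1, rfl⟩

theorem ports_agree (codestr : String) : codestr2code codestr = codestr2code_alt codestr := by
  simp only [codestr2code, codestr2code_alt]
  rw [(invariant codestr.toList).1]
  simp

-- ===== VERDICT (by name: the statement is the Claim_ definition above) =====
theorem codestr2code_spec : Claim_equal_codestr2code := by
  intro codestr _ _
  unfold Spec_codestr2code
  exact ports_agree codestr
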